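-- pv_equiv track=rewrite | github.com/JaeEon-Ryu/Coding_test | Programmers/Level_3/Lv3_예산.py | solution
-- ===== SOURCE A (Python) =====
-- def solution(budgets, M):
--     answer = 0
--     budgets.sort()
--     L, R = 0, budgets[-1]
--
--     while L <= R:
--         mid = (L + R) // 2
--         sum_budgets = 0
--
--         for value in budgets:
--             if value > mid:
--                 sum_budgets += mid
--             else:
--                 sum_budgets += value
--
--         if sum_budgets <= M:
--             L = mid + 1
--             answer = mid
--         else:
--             R = mid - 1
--
--     return answer
-- ===== SOURCE B (Python) =====
-- def solution(budgets, M):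
--     budgets.sort()
--     n = len(budgets)
--     cap = budgets[-1]          # if the whole sum fits, everyone gets their full request
--     prefix = 0
--     for i, b in enumerate(budgets):
--         if prefix + b * (n - i) > M:
--             cap = (M - prefix) // (n - i)
--             break
--         prefix += b
--     return max(cap, 0)
-- ===== Notes on version B (the rewrite author's own statement) =====
-- stated objective: faster
-- what changed: Replaces A's binary search over the cap value (recomputing the capped sum over the whole list at every probe) by one sorted prefix-sum sweep that finds the segment where the budget runs out and computes the optimal cap there in closed form.
-- outside the precondition, e.g. on solution([], 0): A raises IndexError, B raises IndexError
import Mathlib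
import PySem

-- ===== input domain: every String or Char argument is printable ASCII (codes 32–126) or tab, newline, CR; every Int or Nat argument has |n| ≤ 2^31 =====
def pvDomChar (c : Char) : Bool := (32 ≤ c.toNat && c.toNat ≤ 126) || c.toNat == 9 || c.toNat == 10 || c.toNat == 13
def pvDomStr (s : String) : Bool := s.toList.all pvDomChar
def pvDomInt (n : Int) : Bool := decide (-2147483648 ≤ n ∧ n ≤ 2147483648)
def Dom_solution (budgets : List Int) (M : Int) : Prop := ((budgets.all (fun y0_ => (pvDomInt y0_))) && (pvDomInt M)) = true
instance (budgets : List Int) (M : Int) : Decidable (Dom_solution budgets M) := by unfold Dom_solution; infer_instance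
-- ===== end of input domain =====

-- B replaces A's binary search on the cap by one prefix-sum sweep over the sorted list (closed-form cap
-- in the segment where the money runs out). Both A and B sort `budgets` in place; the equivalence proved
-- here is about the return value.

-- ===== PORT A =====
-- inner `for value in budgets` loop of A
def solnSum (budgets : List Int) (mid : Int) : Int :=
  budgets.foldl (fun s v => if v > mid then s + mid else s + v) 0

-- `while L <= R` loop of A
def solnBS (budgets : List Int) (M : Int) (L R answer : Int) : Int :=
  if h : L ≤ R then
    let mid := PySem.Int.floordiv (L + R) 2
    if solnSum budgets mid ≤ M then solnBS budgets M (mid + 1) R mid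
    else solnBS budgets M L (mid - 1) answer
  else answer
termination_by (R + 1 - L).toNat
decreasing_by
  · have := PySem.Int.floordiv_two_mid_bounds h; omega
  · have := PySem.Int.floordiv_two_mid_bounds h; omega

def solution (budgets : List Int) (M : Int) : Int :=
  let b := PySem.List.sorted budgets (fun x => x) false
  solnBS b M 0 (PySem.List.pyGetD b (-1) 0) 0

-- ===== PORT B =====
-- B's `for i, b in enumerate(budgets)` loop with prefix accumulator; `some c` = the loop broke with cap c
def altScan (M : Int) : List Int → Int → Option Int
  | [], _ => none
  | b :: rest, p =>
      if p + b * (1 + (rest.length : Int)) > M then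
        some (PySem.Int.floordiv (M - p) (1 + (rest.length : Int)))
      else altScan M rest (p + b)

def solution_alt (budgets : List Int) (M : Int) : Int :=
  let s := PySem.List.sorted budgets (fun x => x) false
  let cap := (altScan M s 0).getD (PySem.List.pyGetD s (-1) 0)
  max cap 0

-- ===== PRECONDITION & SPEC =====
-- A evaluates budgets[-1]: it raises IndexError on the empty list (so does B); nothing else is excluded.
def Pre_solution (budgets : List Int) (M : Int) : Prop := budgets ≠ []
instance (budgets : List Int) (M : Int) : Decidable (Pre_solution budgets M) := by
  unfold Pre_solution; infer_instance
def pvWitness_solution : List Int × Int := ([1, 3, 2, 5], 9)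

def Spec_solution (budgets : List Int) (M : Int) (out : Int) : Prop := out = solution_alt budgets M
instance (budgets : List Int) (M : Int) (out : Int) : Decidable (Spec_solution budgets M out) := by
  unfold Spec_solution; infer_instance

-- ===== CLAIM (what is proved, stated in full; the proofs are below) =====
def Claim_equal_solution : Prop := ∀ (budgets : List Int) (M : Int), Dom_solution budgets M → Pre_solution budgets M → Spec_solution budgets M (solution budgets M)

-- ===== LEMMAS AND PROOFS =====

-- the capped sum `sum(min(v, m) for v in s)` both programs reason about
def Fsum (s : List Int) (m : Int) : Int := (s.map (fun v => min v m)).sum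

theorem solnSum_eq_Fsum (s : List Int) (m : Int) : solnSum s m = Fsum s m := by
  have key : ∀ (l : List Int) (acc : Int),
      l.foldl (fun s v => if v > m then s + m else s + v) acc = acc + Fsum l m := by
    intro l
    induction l with
    | nil => intro acc; simp [Fsum]
    | cons b t ih =>
        intro acc
        simp only [List.foldl_cons, ih, Fsum, List.map_cons, List.sum_cons]
        by_cases hb : b > m <;> simp [hb] <;> omega
  simpa [solnSum] using key s 0

theorem Fsum_mono (s : List Int) {m m' : Int} (h : m ≤ m') : Fsum s m ≤ Fsum s m' := by
  induction s with
  | nil => simp [Fsum]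
  | cons b t ih =>
      simp only [Fsum, List.map_cons, List.sum_cons] at *
      have : min b m ≤ min b m' := by omega
      omega

theorem Fsum_of_le (xs : List Int) (m : Int) (h : ∀ v ∈ xs, v ≤ m) : Fsum xs m = xs.sum := by
  induction xs with
  | nil => simp [Fsum]
  | cons b t ih =>
      have hb : b ≤ m := h b (by simp)
      have ht := ih (fun v hv => h v (by simp [hv]))
      simp only [Fsum, List.map_cons, List.sum_cons] at *
      omega

theorem Fsum_of_ge (xs : List Int) (m : Int) (h : ∀ v ∈ xs, m ≤ v) :
    Fsum xs m = m * xs.length := by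
  induction xs with
  | nil => simp [Fsum]
  | cons b t ih =>
      have hb : m ≤ b := h b (by simp)
      have ht := ih (fun v hv => h v (by simp [hv]))
      simp only [Fsum, List.map_cons, List.sum_cons, List.length_cons] at *
      have hmin : min b m = m := by omega
      rw [hmin, ht]; push_cast; ring

-- value of the capped sum when the cap falls in the segment before b
theorem Fsum_split (d rest : List Int) (b m : Int)
    (hd : ∀ x ∈ d, x ≤ m) (hb : m ≤ b) (hrest : ∀ v ∈ rest, b ≤ v) :
    Fsum (d ++ b :: rest) m = d.sum + m * (1 + (rest.length : Int)) := by
  have hge : ∀ v ∈ b :: rest, m ≤ v := by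
    intro v hv
    rcases List.mem_cons.mp hv with rfl | hv
    · exact hb
    · exact le_trans hb (hrest v hv)
  have happ : Fsum (d ++ b :: rest) m = Fsum d m + Fsum (b :: rest) m := by
    simp [Fsum]
  rw [happ, Fsum_of_le d m hd, Fsum_of_ge _ m hge]
  simp only [List.length_cons]
  push_cast; ring

theorem le_getLast_of_pairwise (s : List Int) (h : s.Pairwise (· ≤ ·)) (hne : s ≠ []) :
    ∀ x ∈ s, x ≤ s.getLast hne := by
  induction s with
  | nil => simp at hne
  | cons b t ih =>
      intro x hx
      rcases List.mem_cons.mp hx with rfl | hxt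
      · cases t with
        | nil => simp
        | cons c u =>
            have hb : x ≤ c := (List.pairwise_cons.mp h).1 c (by simp)
            have := ih (List.pairwise_cons.mp h).2 (by simp) c (by simp)
            rw [List.getLast_cons (by simp)]
            omega
      · cases t with
        | nil => simp at hxt
        | cons c u =>
            rw [List.getLast_cons (by simp)]
            exact ih (List.pairwise_cons.mp h).2 (by simp) x hxt

-- the value both programs compute: either no cap in [0, maxb] is affordable and the answer is 0,
-- or it is the largest affordable cap in [0, maxb]
def Good (s : List Int) (M maxb r : Int) : Prop :=
  ((maxb < 0 ∨ ¬ Fsum s 0 ≤ M) ∧ r = 0) ∨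
  (0 ≤ r ∧ r ≤ maxb ∧ Fsum s r ≤ M ∧ ∀ m, r < m → m ≤ maxb → ¬ Fsum s m ≤ M)

theorem good_unique (s : List Int) (M maxb r1 r2 : Int)
    (h1 : Good s M maxb r1) (h2 : Good s M maxb r2) : r1 = r2 := by
  rcases h1 with ⟨hc1, rfl⟩ | ⟨hr1, hb1, hf1, hm1⟩ <;>
    rcases h2 with ⟨hc2, rfl⟩ | ⟨hr2, hb2, hf2, hm2⟩
  · rfl
  · exfalso
    rcases hc1 with h | h
    · omega
    · exact h (le_trans (Fsum_mono s hr2) hf2)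
  · exfalso
    rcases hc2 with h | h
    · omega
    · exact h (le_trans (Fsum_mono s hr1) hf1)
  · by_contra hne
    rcases lt_trichotomy r1 r2 with h | h | h
    · exact hm1 r2 h hb2 hf2
    · exact hne h
    · exact hm2 r1 h hb1 hf1

theorem solnBS_good (s : List Int) (M maxb : Int) :
    ∀ L R ans, 0 ≤ L →
      ((ans = 0 ∧ L = 0) ∨ (Fsum s ans ≤ M ∧ ans = L - 1 ∧ 0 ≤ ans ∧ ans ≤ maxb)) →
      (∀ m, R < m → m ≤ maxb → ¬ Fsum s m ≤ M) →
      R ≤ maxb →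
      Good s M maxb (solnBS s M L R ans) := by
  intro L R ans
  induction L, R, ans using solnBS.induct s M with
  | case1 L R ans h mid hfeas ih =>
      intro hL hans hR hRm
      rw [solnBS]
      simp only [dif_pos h]
      rw [solnSum_eq_Fsum] at hfeas
      have hmid := PySem.Int.floordiv_two_mid_bounds h
      rw [if_pos (by rw [solnSum_eq_Fsum]; exact hfeas)]
      exact ih (by omega) (Or.inr ⟨hfeas, by omega, by omega, by omega⟩) hR hRm
  | case2 L R ans h mid hfeas ih =>
      intro hL hans hR hRm
      rw [solnBS]
      simp only [dif_pos h]
      rw [solnSum_eq_Fsum] at hfeas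
      have hmid := PySem.Int.floordiv_two_mid_bounds h
      rw [if_neg (by rw [solnSum_eq_Fsum]; exact hfeas)]
      refine ih (by omega) hans ?_ (by omega)
      intro m hm hmb hfm
      by_cases hmR : R < m
      · exact hR m hmR hmb hfm
      · exact hfeas (le_trans (Fsum_mono s (by omega)) hfm)
  | case3 L R ans h =>
      intro hL hans hR hRm
      rw [solnBS]
      simp only [dif_neg h]
      rcases hans with ⟨rfl, rfl⟩ | ⟨hf, hl, h0, hmb⟩
      · left
        refine ⟨?_, rfl⟩
        by_cases hm : maxb < 0
        · exact Or.inl hm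
        · exact Or.inr (hR 0 (by omega) (by omega))
      · right
        refine ⟨h0, hmb, hf, ?_⟩
        intro m hm hmb' hfm
        exact hR m (by omega) hmb' hfm

theorem altScan_good (s : List Int) (M : Int) (hs : s.Pairwise (· ≤ ·)) (hne : s ≠ []) :
    ∀ (l d : List Int) (p : Int), s = d ++ l → p = d.sum →
      (∀ hd : d ≠ [], Fsum s (d.getLast hd) ≤ M) →
      Good s M (s.getLast hne) (max ((altScan M l p).getD (s.getLast hne)) 0) := by
  intro l
  induction l with
  | nil =>
      intro d p hsplit hp hdfeas
      simp only [altScan, Option.getD_none]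
      have hds : d = s := by rw [hsplit]; simp
      subst hds
      have hfeasmax : Fsum d (d.getLast hne) ≤ M := hdfeas hne
      by_cases h0 : 0 ≤ d.getLast hne
      · right
        refine ⟨by omega, by omega, ?_, ?_⟩
        · have hmx : max (d.getLast hne) 0 = d.getLast hne := by omega
          rw [hmx]; exact hfeasmax
        · intro m hm hmb _; omega
      · left
        exact ⟨Or.inl (by omega), by omega⟩
  | cons b rest ih =>
      intro d p hsplit hp hdfeas
      have hkpos : 0 < 1 + (rest.length : Int) := by positivity
      -- order facts from sortedness
      have hpw := hsplit ▸ hs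
      have hsplitPW := List.pairwise_append.mp hpw
      have hdb : ∀ x ∈ d, x ≤ b := fun x hx => hsplitPW.2.2 x hx b (by simp)
      have hbrest : ∀ v ∈ rest, b ≤ v := (List.pairwise_cons.mp hsplitPW.2.1).1
      have hbmax : b ≤ s.getLast hne :=
        le_getLast_of_pairwise s hs hne b (by rw [hsplit]; simp)
      have hFsum_at : ∀ m, (∀ x ∈ d, x ≤ m) → m ≤ b →
          Fsum s m = p + m * (1 + (rest.length : Int)) := by
        intro m h1 h2
        rw [hsplit, Fsum_split d rest b m h1 h2 hbrest, hp]
      simp only [altScan]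
      by_cases hbreak : p + b * (1 + (rest.length : Int)) > M
      · -- the budget runs out in this segment: closed-form cap
        rw [if_pos hbreak]
        simp only [Option.getD_some]
        set c : Int := PySem.Int.floordiv (M - p) (1 + (rest.length : Int)) with hc
        have hcb : c < b := by
          rw [hc, PySem.Int.floordiv_lt_iff_lt_mul hkpos]
          nlinarith
        have hck : c * (1 + (rest.length : Int)) ≤ M - p :=
          (PySem.Int.le_floordiv_iff_mul_le hkpos).mp (le_of_eq hc)
        have hdc : ∀ x ∈ d, x ≤ c := by
          intro x hx
          have hdne : d ≠ [] := by rintro rfl; simp at hx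
          have hgl := le_getLast_of_pairwise d hsplitPW.1 hdne x hx
          have hglb : d.getLast hdne ≤ b := hdb _ (List.getLast_mem hdne)
          have hglfeas : Fsum s (d.getLast hdne) ≤ M := hdfeas hdne
          rw [hFsum_at (d.getLast hdne)
              (le_getLast_of_pairwise d hsplitPW.1 hdne) hglb] at hglfeas
          have hgc : d.getLast hdne ≤ c := by
            rw [hc, PySem.Int.le_floordiv_iff_mul_le hkpos]; omega
          omega
        have hmax : ∀ m, c < m → ¬ Fsum s m ≤ M := by
          intro m hm hfm
          by_cases hmb : b ≤ m
          · have h1 : Fsum s b ≤ Fsum s m := Fsum_mono s hmb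
            rw [hFsum_at b hdb le_rfl] at h1
            omega
          · have h1 : Fsum s m = p + m * (1 + (rest.length : Int)) :=
              hFsum_at m (fun x hx => le_trans (hdc x hx) (le_of_lt hm)) (by omega)
            have h2 : M - p < (c + 1) * (1 + (rest.length : Int)) :=
              (PySem.Int.floordiv_lt_iff_lt_mul hkpos).mp
                (by rw [← hc]; omega)
            nlinarith
        by_cases h0 : 0 ≤ c
        · right
          have hmx : max c 0 = c := by omega
          rw [hmx]
          refine ⟨h0, by omega, ?_, fun m hm _ => hmax m hm⟩
          rw [hFsum_at c hdc (le_of_lt hcb)]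
          omega
        · left
          refine ⟨Or.inr (hmax 0 (by omega)), by omega⟩
      · -- affordable so far: continue the sweep
        rw [if_neg hbreak]
        apply ih (d ++ [b]) (p + b)
        · rw [hsplit]; simp
        · simp [hp]
        · intro hd
          have hgl : (d ++ [b]).getLast hd = b := List.getLast_append_singleton d
          rw [hgl, hFsum_at b hdb le_rfl]
          omega

theorem sorted_ne_nil (budgets : List Int) (hne : budgets ≠ []) :
    PySem.List.sorted budgets (fun x => x) false ≠ [] := by
  intro h
  have hperm := PySem.List.sorted_perm budgets (fun x => x) false
  rw [h] at hperm
  exact hne hperm.nil_eq.symm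

theorem sorted_pairwise_le (budgets : List Int) :
    (PySem.List.sorted budgets (fun x => x) false).Pairwise (· ≤ ·) := by
  simpa using PySem.List.sorted_pairwise budgets (fun x => x)

theorem solution_good (budgets : List Int) (M : Int) (hne : budgets ≠ []) :
    Good (PySem.List.sorted budgets (fun x => x) false) M
      ((PySem.List.sorted budgets (fun x => x) false).getLast (sorted_ne_nil budgets hne))
      (solution budgets M) := by
  have hsne : PySem.List.sorted budgets (fun x => x) false ≠ [] := sorted_ne_nil budgets hne
  have hlast : PySem.List.pyGetD (PySem.List.sorted budgets (fun x => x) false) (-1) 0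
      = (PySem.List.sorted budgets (fun x => x) false).getLast hsne :=
    PySem.List.pyGetD_neg_one _ 0 hsne
  show Good _ M _ (solnBS _ M 0 (PySem.List.pyGetD _ (-1) 0) 0)
  rw [hlast]
  exact solnBS_good _ M _ 0 _ 0 le_rfl (Or.inl ⟨rfl, rfl⟩) (fun m hm hmb _ => by omega) le_rfl

theorem solution_alt_good (budgets : List Int) (M : Int) (hne : budgets ≠ []) :
    Good (PySem.List.sorted budgets (fun x => x) false) M
      ((PySem.List.sorted budgets (fun x => x) false).getLast (sorted_ne_nil budgets hne))
      (solution_alt budgets M) := by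
  have hsne : PySem.List.sorted budgets (fun x => x) false ≠ [] := sorted_ne_nil budgets hne
  have hlast : PySem.List.pyGetD (PySem.List.sorted budgets (fun x => x) false) (-1) 0
      = (PySem.List.sorted budgets (fun x => x) false).getLast hsne :=
    PySem.List.pyGetD_neg_one _ 0 hsne
  show Good _ M _
    (max ((altScan M (PySem.List.sorted budgets (fun x => x) false) 0).getD
      (PySem.List.pyGetD (PySem.List.sorted budgets (fun x => x) false) (-1) 0)) 0)
  rw [hlast]
  exact altScan_good _ M (sorted_pairwise_le budgets) hsne _ [] 0 (by simp) (by simp)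
    (fun hd => absurd rfl hd)

-- ===== VERDICT (by name: the statement is the Claim_ definition above) =====
theorem solution_spec : Claim_equal_solution := by
  intro budgets M _ hpre
  unfold Spec_solution
  exact good_unique _ M _ _ _ (solution_good budgets M hpre) (solution_alt_good budgets M hpre)
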